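-- pv_equiv track=rewrite | github.com/poojithreddy28/TechnicalPrepDSA | Session4/Problems.py | prioritize_observations
-- ===== SOURCE A (Python) =====
-- def prioritize_observations(observed_species, priority_species):
--     prioritized_list = []
--
--     # Add all occurrences of each priority species to the prioritized list
--     for species in priority_species:
--         while species in observed_species:
--             prioritized_list.append(species)
--             observed_species.remove(species)
--
--     # Sort the remaining species and extend the prioritized list with them
--     prioritized_list.extend(sorted(observed_species))
--
--     return prioritized_list
-- ===== SOURCE B (Python) =====
-- def prioritize_observations(observed_species, priority_species):
--     # One-pass partition with set membership instead of repeated `in`/`remove` scans;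
--     # mutates observed_species (keeps only non-priority species) like the original.
--     priority_set = set(priority_species)
--     rest = sorted(s for s in observed_species if s not in priority_set)
--     head = []
--     seen = set()
--     for species in priority_species:
--         if species not in seen:
--             seen.add(species)
--             head.extend(s for s in observed_species if s == species)
--     observed_species[:] = [s for s in observed_species if s not in priority_set]
--     return head + rest
-- ===== Notes on version B (the rewrite author's own statement) =====
-- stated objective: alternative
-- what changed: Replaces A's repeated `while species in observed: observed.remove(species)` scan-and-delete loops by a precomputed priority set, membership filters over the untouched input list, and a dedup pass over priority_species; the same in-place mutation of observed_species is performed once at the end.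
import Mathlib
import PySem

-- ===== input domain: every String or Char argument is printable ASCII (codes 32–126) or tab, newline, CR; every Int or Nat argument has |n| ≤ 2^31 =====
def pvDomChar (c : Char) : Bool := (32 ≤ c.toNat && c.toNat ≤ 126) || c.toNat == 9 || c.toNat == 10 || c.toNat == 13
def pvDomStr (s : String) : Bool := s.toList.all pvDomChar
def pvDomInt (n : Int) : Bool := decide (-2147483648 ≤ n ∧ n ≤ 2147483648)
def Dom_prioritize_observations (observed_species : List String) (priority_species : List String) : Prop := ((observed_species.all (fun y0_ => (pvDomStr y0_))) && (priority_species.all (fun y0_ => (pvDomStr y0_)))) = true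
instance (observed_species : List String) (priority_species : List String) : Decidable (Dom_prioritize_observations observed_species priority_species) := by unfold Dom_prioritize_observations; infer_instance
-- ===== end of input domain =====

-- B replaces A's repeated `while species in observed: remove` scan-and-delete loops by
-- set-membership filters over the untouched input list (objective: alternative/idiomatic).
-- A mutates observed_species in place (B's Python mirrors that mutation); the equivalence
-- proved here is about the RETURN value only.

-- ===== PORT A =====
-- A's inner `while species in observed_species: prioritized.append(species); observed_species.remove(species)`
def pvWhileRemove (species : String) (prioritized : List String) (obs : List String) :
    List String × List String :=
  if _h : obs.contains species then
    match hr : PySem.List.remove? obs species with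
    | some obs' => pvWhileRemove species (prioritized ++ [species]) obs'
    | none => (prioritized, obs)   -- unreachable: species ∈ obs
  else (prioritized, obs)
termination_by obs.length
decreasing_by
  have hmem : species ∈ obs := by simpa using _h
  rw [PySem.List.remove?_eq_some_erase obs species hmem] at hr
  cases hr
  have h1 := List.length_erase_of_mem hmem
  have h2 := List.length_pos_of_mem hmem
  omega

def prioritize_observations (observed_species : List String) (priority_species : List String) : List String :=
  let st := priority_species.foldl
    (fun (st : List String × List String) species => pvWhileRemove species st.1 st.2)
    ([], observed_species)
  st.1 ++ PySem.List.sorted st.2 (fun x => x) false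

-- ===== PORT B =====
def prioritize_observations_alt (observed_species : List String) (priority_species : List String) : List String :=
  let priority_set : PySem.Set String := PySem.Set.ofList priority_species
  let rest := PySem.List.sorted
    (observed_species.filter (fun s => !(PySem.Set.contains priority_set s))) (fun x => x) false
  let st := priority_species.foldl
    (fun (st : PySem.Set String × List String) species =>
      if PySem.Set.contains st.1 species then st
      else (PySem.Set.add st.1 species, st.2 ++ observed_species.filter (fun s => s == species)))
    (PySem.Set.empty, [])
  st.2 ++ rest

-- ===== PRECONDITION & SPEC =====
def Spec_prioritize_observations (observed_species : List String) (priority_species : List String) (out : List String) : Prop := out = prioritize_observations_alt observed_species priority_species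
instance (observed_species : List String) (priority_species : List String) (out : List String) : Decidable (Spec_prioritize_observations observed_species priority_species out) := by unfold Spec_prioritize_observations; infer_instance

-- ===== CLAIM (what is proved, stated in full; the proofs are below) =====
def Claim_equal_prioritize_observations : Prop := ∀ (observed_species : List String) (priority_species : List String), Dom_prioritize_observations observed_species priority_species → Spec_prioritize_observations observed_species priority_species (prioritize_observations observed_species priority_species)

-- ===== LEMMAS AND PROOFS =====

theorem pv_contains_mem (s : List String) (x : String) :
    PySem.Set.contains s x = decide (x ∈ s) := by simp [pysem]

-- filtering away a value not satisfying p commutes with erasing it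
theorem pv_filter_erase (p : String → Bool) (a : String) (hp : p a = false) :
    ∀ l : List String, (l.erase a).filter p = l.filter p := by
  intro l
  induction l with
  | nil => rfl
  | cons x xs ih =>
    by_cases hx : x = a
    · subst hx; simp [List.erase_cons_head, hp]
    · rw [List.erase_cons_tail (by simpa using hx)]
      simp [List.filter_cons, ih]

-- A's while-loop appends all occurrences of species and filters them out of obs
theorem pvWhileRemove_eq (species : String) :
    ∀ (obs prioritized : List String),
      pvWhileRemove species prioritized obs =
        (prioritized ++ List.replicate (obs.count species) species,
         obs.filter (fun x => !(x == species))) := by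
  intro obs
  induction hn : obs.length using Nat.strong_induction_on generalizing obs with
  | _ n ih =>
    intro prioritized
    rw [pvWhileRemove.eq_def]
    by_cases h : species ∈ obs
    · have hc : obs.contains species = true := by simpa using h
      simp only [hc, dif_pos]
      split
      case _ obs' hr =>
        rw [PySem.List.remove?_eq_some_erase obs species h] at hr
        cases hr
        have h1 := List.length_erase_of_mem (a := species) (l := obs) h
        have h2 := List.length_pos_of_mem h
        rw [ih (obs.erase species).length (by omega) _ rfl]
        have hcnt : (obs.erase species).count species + 1 = obs.count species := by
          rw [List.count_erase_self]
          have := List.count_pos_iff.mpr h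
          omega
        rw [Prod.mk.injEq]
        constructor
        · rw [← hcnt, List.replicate_succ]
          simp
        · exact pv_filter_erase _ species (by simp) obs
      case _ hr =>
        rw [PySem.List.remove?_eq_some_erase obs species h] at hr
        cases hr
    · have hc : obs.contains species = false := by simpa using h
      rw [dif_neg (by simpa using h)]
      have hcnt : obs.count species = 0 := List.count_eq_zero.mpr h
      rw [hcnt]
      rw [Prod.mk.injEq]
      constructor
      · simp
      · refine (List.filter_eq_self.mpr ?_).symm
        intro x hx
        simp only [Bool.not_eq_eq_eq_not, Bool.not_true, beq_eq_false_iff_ne]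
        rintro rfl; exact h hx

-- the main fold invariant: A's fold state is determined by B's fold state
theorem pv_fold_inv (observed : List String) :
    ∀ (pri : List String) (seen : List String) (acc : List String),
      (pri.foldl (fun (st : List String × List String) species => pvWhileRemove species st.1 st.2)
        (acc, observed.filter (fun x => !(PySem.Set.contains seen x)))) =
      ((pri.foldl
        (fun (st : PySem.Set String × List String) species =>
          if PySem.Set.contains st.1 species then st
          else (PySem.Set.add st.1 species, st.2 ++ observed.filter (fun s => s == species)))
        ((seen : PySem.Set String), acc)).2,
       observed.filter (fun x => !(PySem.Set.contains (pri.foldl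
        (fun (st : PySem.Set String × List String) species =>
          if PySem.Set.contains st.1 species then st
          else (PySem.Set.add st.1 species, st.2 ++ observed.filter (fun s => s == species)))
        ((seen : PySem.Set String), acc)).1 x))) := by
  intro pri
  induction pri with
  | nil => intro seen acc; rfl
  | cons sp pri ih =>
    intro seen acc
    simp only [List.foldl_cons]
    rw [pvWhileRemove_eq]
    by_cases hs : sp ∈ seen
    · have hcb : PySem.Set.contains seen sp = true := by rw [pv_contains_mem]; exact decide_eq_true hs
      have hcnt : (observed.filter (fun x => !(PySem.Set.contains seen x))).count sp = 0 := by
        apply List.count_eq_zero.mpr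
        intro hmem'
        have := (List.mem_filter.mp hmem').2
        rw [pv_contains_mem] at this
        simp [hs] at this
      have hfix : (observed.filter (fun x => !(PySem.Set.contains seen x))).filter
          (fun x => !(x == sp)) = observed.filter (fun x => !(PySem.Set.contains seen x)) := by
        apply List.filter_eq_self.mpr
        intro x hx
        have := (List.mem_filter.mp hx).2
        rw [pv_contains_mem] at this
        simp only [Bool.not_eq_eq_eq_not, Bool.not_true, beq_eq_false_iff_ne]
        rintro rfl; simp [hs] at this
      rw [hcnt, hfix]
      simp only [List.replicate_zero, List.append_nil, hcb, if_pos]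
      exact ih seen acc
    · have hcb : PySem.Set.contains seen sp = false := by rw [pv_contains_mem]; exact decide_eq_false hs
      have hcnt : (observed.filter (fun x => !(PySem.Set.contains seen x))).count sp =
          observed.count sp := List.count_filter (by simpa [pv_contains_mem] using hs)
      have hrepl : List.replicate (observed.count sp) sp =
          observed.filter (fun s => s == sp) := (List.filter_beq (l := observed) (a := sp)).symm
      have hnext : (observed.filter (fun x => !(PySem.Set.contains seen x))).filter
          (fun x => !(x == sp)) =
          observed.filter (fun x => !(PySem.Set.contains (PySem.Set.add seen sp) x)) := by
        rw [List.filter_filter]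
        apply List.filter_congr
        intro x _
        simp only [pv_contains_mem, PySem.Set.mem_add]
        by_cases hx : x = sp
        · subst hx; simp
        · simp [hx]
      rw [hcnt, hrepl, hnext]
      simp only [hcb, Bool.false_eq_true, if_false]
      exact ih (PySem.Set.add seen sp) (acc ++ observed.filter (fun s => s == sp))

-- the seen-component of B's fold is Set.update of the initial seen set
theorem pv_fold_fst (observed : List String) :
    ∀ (pri : List String) (st : PySem.Set String × List String),
      (pri.foldl
        (fun (st : PySem.Set String × List String) species =>
          if PySem.Set.contains st.1 species then st
          else (PySem.Set.add st.1 species, st.2 ++ observed.filter (fun s => s == species)))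
        st).1 = PySem.Set.update st.1 pri := by
  intro pri
  induction pri with
  | nil => intro st; rfl
  | cons sp pri ih =>
    intro st
    simp only [List.foldl_cons, PySem.Set.update_cons]
    by_cases hs : PySem.Set.contains st.1 sp = true
    · rw [if_pos hs, ih]
      congr 1
      refine (PySem.Set.add_of_mem ?_).symm
      rw [pv_contains_mem] at hs; simpa using hs
    · rw [if_neg (by simp_all)]
      exact ih _

-- ===== VERDICT (by name: the statement is the Claim_ definition above) =====
theorem prioritize_observations_spec : Claim_equal_prioritize_observations := by
  intro observed priority _
  unfold Spec_prioritize_observations prioritize_observations prioritize_observations_alt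
  have h0 : observed.filter (fun x => !(PySem.Set.contains ([] : List String) x)) = observed := by
    simp [PySem.Set.contains]
  have hinv := pv_fold_inv observed priority [] []
  rw [h0] at hinv
  have hfst := pv_fold_fst observed priority (([] : PySem.Set String), ([] : List String))
  rw [hfst] at hinv
  simp only [hinv, PySem.Set.update_nil_left]
  rfl
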